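-- pv_equiv track=rewrite | github.com/dazhaoniel/project-euler-solutions | problems.py | number_to_letter
-- ===== SOURCE A (Python) =====
-- def number_to_letter(n):
-- 	d = { 0: '', 1: 'one', 2: 'two', 3: 'three', 4: 'four', 5: 'five',
-- 	6: 'six', 7: 'seven', 8: 'eight', 9: 'nine', 10: 'ten', 11: 'eleven',
-- 	12: 'twelve', 13: 'thirteen', 14: 'fourteen', 15: 'fifteen', 16: 'sixteen',
-- 	17: 'seventeen', 18: 'eighteen', 19: 'nineteen', 20: 'twenty',
-- 	30: 'thirty', 40: 'forty', 50: 'fifty', 60: 'sixty', 70: 'seventy',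
-- 	80: 'eighty', 90: 'ninety', 100: 'hundred'}
-- 	if (n <= 20):
-- 		return len(d[n])
-- 	elif (20 < n < 100):
-- 		l = [int(char) for char in str(n)]
-- 		return len(d[l[0]*10]) + len(d[l[1]])
-- 	elif (100 <= n < 1000):
-- 		l = [int(char) for char in str(n)]
-- 		temp = len(d[l[0]]) + len(d[100])
-- 		if (n % 100 == 0):
-- 			return temp
-- 		else:
-- 			return temp + len('and') + number_to_letter(n % 100)
-- 	elif n == 1000:
-- 		return len('onethousand')
-- 	else: return 0
-- ===== SOURCE B (Python) =====
-- # B: build the English spelling as a string (spaces omitted) in one non-recursive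
-- # pass with divmod, and return its length; out-of-range n (<0 or >1000) yields 0.
-- ONES = ["", "one", "two", "three", "four", "five", "six", "seven", "eight",
--         "nine", "ten", "eleven", "twelve", "thirteen", "fourteen", "fifteen",
--         "sixteen", "seventeen", "eighteen", "nineteen"]
-- TENS = ["", "", "twenty", "thirty", "forty", "fifty", "sixty", "seventy",
--         "eighty", "ninety"]
--
-- def number_to_letter(n):
--     if n < 0 or n > 1000:
--         return 0
--     if n == 1000:
--         return len("onethousand")
--     h, r = divmod(n, 100)
--     words = ""
--     if h:
--         words += ONES[h] + "hundred" + ("and" if r else "")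
--     if r < 20:
--         words += ONES[r]
--     else:
--         t, u = divmod(r, 10)
--         words += TENS[t] + ONES[u]
--     return len(words)
-- ===== Notes on version B (the rewrite author's own statement) =====
-- stated objective: simpler
-- what changed: B builds the full spelling by peeling hundreds/tens/units with divmod and word tables and returns the string's length, replacing A's dict of words, string-digit parsing of str(n) and recursive call for the sub-hundred part.
import Mathlib
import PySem

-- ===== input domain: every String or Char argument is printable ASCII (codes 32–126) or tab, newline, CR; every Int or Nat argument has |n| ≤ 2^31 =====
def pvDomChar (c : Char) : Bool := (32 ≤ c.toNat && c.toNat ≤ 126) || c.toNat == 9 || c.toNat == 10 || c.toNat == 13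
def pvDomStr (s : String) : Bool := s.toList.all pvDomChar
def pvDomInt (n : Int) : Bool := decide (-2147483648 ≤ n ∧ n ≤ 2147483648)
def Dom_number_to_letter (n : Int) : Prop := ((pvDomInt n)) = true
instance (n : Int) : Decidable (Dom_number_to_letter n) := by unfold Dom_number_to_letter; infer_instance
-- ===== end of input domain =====

-- B changes the decomposition only (build the spelling with divmod and word tables,
-- return its length); equivalence is proved for n ≥ 0 (A raises KeyError for n < 0).

-- ===== PORT A =====
-- A's word dict (values as List Char so len is kernel-transparent)
def pvDictA : PySem.Dict Int (List Char) :=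
  PySem.Dict.ofList [(0, "".toList), (1, "one".toList), (2, "two".toList),
    (3, "three".toList), (4, "four".toList), (5, "five".toList),
    (6, "six".toList), (7, "seven".toList), (8, "eight".toList),
    (9, "nine".toList), (10, "ten".toList), (11, "eleven".toList),
    (12, "twelve".toList), (13, "thirteen".toList), (14, "fourteen".toList),
    (15, "fifteen".toList), (16, "sixteen".toList), (17, "seventeen".toList),
    (18, "eighteen".toList), (19, "nineteen".toList), (20, "twenty".toList),
    (30, "thirty".toList), (40, "forty".toList), (50, "fifty".toList),
    (60, "sixty".toList), (70, "seventy".toList), (80, "eighty".toList),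
    (90, "ninety".toList), (100, "hundred".toList)]

-- fueled transliteration of A's body (fuel only makes the single recursive call
-- structural; depth 2 suffices since the recursive argument is < 100)
def pvAGo (fuel : Nat) (n : Int) : Int :=
  match fuel with
  | 0 => 0
  | fuel + 1 =>
    let d := pvDictA
    if n ≤ 20 then ((d.getD n []).length : Int)
    else if 20 < n ∧ n < 100 then
      let l := (PySem.Int.toChars n).map (fun c => (PySem.Int.ofChars? [c]).getD 0)
      ((d.getD (PySem.List.pyGetD l 0 0 * 10) []).length : Int)
        + ((d.getD (PySem.List.pyGetD l 1 0) []).length : Int)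
    else if 100 ≤ n ∧ n < 1000 then
      let temp : Int := ((d.getD (PySem.List.pyGetD ((PySem.Int.toChars n).map
            (fun c => (PySem.Int.ofChars? [c]).getD 0)) 0 0) []).length : Int)
          + ((d.getD 100 []).length : Int)
      if PySem.Int.mod n 100 = 0 then temp
      else temp + (PySem.Chars.len "and".toList) + pvAGo fuel (PySem.Int.mod n 100)
    else if n = 1000 then PySem.Chars.len "onethousand".toList
    else 0

def number_to_letter (n : Int) : Int := pvAGo 2 n

-- ===== PORT B =====
def pvOnes : List (List Char) :=
  ["".toList, "one".toList, "two".toList, "three".toList, "four".toList,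
   "five".toList, "six".toList, "seven".toList, "eight".toList, "nine".toList,
   "ten".toList, "eleven".toList, "twelve".toList, "thirteen".toList,
   "fourteen".toList, "fifteen".toList, "sixteen".toList, "seventeen".toList,
   "eighteen".toList, "nineteen".toList]

def pvTens : List (List Char) :=
  ["".toList, "".toList, "twenty".toList, "thirty".toList, "forty".toList,
   "fifty".toList, "sixty".toList, "seventy".toList, "eighty".toList,
   "ninety".toList]

def number_to_letter_alt (n : Int) : Int :=
  if n < 0 ∨ 1000 < n then 0
  else if n = 1000 then PySem.Chars.len "onethousand".toList
  else
    let h := PySem.Int.floordiv n 100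
    let r := PySem.Int.mod n 100
    let w₁ : List Char :=
      if h ≠ 0 then
        PySem.List.pyGetD pvOnes h [] ++ "hundred".toList
          ++ (if r ≠ 0 then "and".toList else [])
      else []
    let w₂ : List Char :=
      if r < 20 then w₁ ++ PySem.List.pyGetD pvOnes r []
      else
        let t := PySem.Int.floordiv r 10
        let u := PySem.Int.mod r 10
        w₁ ++ PySem.List.pyGetD pvTens t [] ++ PySem.List.pyGetD pvOnes u []
    (w₂.length : Int)

-- ===== PRECONDITION & SPEC =====
-- Pre_ excludes n < 0, where A raises KeyError on its word dict.
def Pre_number_to_letter (n : Int) : Prop := 0 ≤ n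
instance (n : Int) : Decidable (Pre_number_to_letter n) := by unfold Pre_number_to_letter; infer_instance
def pvWitness_number_to_letter : Int := (342)

def Spec_number_to_letter (n : Int) (out : Int) : Prop := out = number_to_letter_alt n
instance (n : Int) (out : Int) : Decidable (Spec_number_to_letter n out) := by unfold Spec_number_to_letter; infer_instance

-- ===== CLAIM (what is proved, stated in full; the proofs are below) =====
def Claim_equal_number_to_letter : Prop := ∀ (n : Int), Dom_number_to_letter n → Pre_number_to_letter n → Spec_number_to_letter n (number_to_letter n)

-- ===== LEMMAS AND PROOFS =====

-- agreement on the finite interesting range, by kernel evaluation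
set_option maxRecDepth 100000 in
set_option maxHeartbeats 4000000 in
theorem pv_fin : ∀ m : Fin 1001, number_to_letter (m.val : Int) = number_to_letter_alt (m.val : Int) := by
  decide

theorem pv_big (n : Int) (h : 1000 < n) : number_to_letter n = number_to_letter_alt n := by
  have h1 : ¬ (n ≤ 20) := by omega
  have h2 : ¬ (20 < n ∧ n < 100) := by omega
  have h3 : ¬ (100 ≤ n ∧ n < 1000) := by omega
  have h4 : ¬ (n = 1000) := by omega
  simp [number_to_letter, pvAGo, number_to_letter_alt, h1, h2, h3, h4, h]

-- ===== VERDICT (by name: the statement is the Claim_ definition above) =====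
theorem number_to_letter_spec : Claim_equal_number_to_letter := by
  intro n _ hp
  unfold Pre_number_to_letter at hp
  unfold Spec_number_to_letter
  by_cases h : n ≤ 1000
  · have hn : n = ((n.toNat : Nat) : Int) := by omega
    have hm : n.toNat < 1001 := by omega
    rw [hn]
    exact pv_fin ⟨n.toNat, hm⟩
  · exact pv_big n (by omega)
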